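-- pv_equiv track=rewrite | github.com/Yannn25/Crypto_Project | cryptography-master/cryptography-master/analyse/C3/question3.py | freqTables
-- ===== SOURCE A (Python) =====
-- def freqTables(txt):
--     table = [dict(), dict(), dict(), dict()]
--     for i in range (len(txt)):
--         if(i%4 == 0):
--             add_to_dict(table[0], txt[i])
--         elif (i%4 == 1):
--             add_to_dict(table[1], txt[i])
--         elif (i%4 == 2):
--             add_to_dict(table[2], txt[i])
--         elif (i%4 == 3):
--             add_to_dict(table[3], txt[i])
--     for i in range (len(table)):
--         table[i] = sort_dict(table[i])
--     return table
--
-- def add_to_dict(d,c):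
--     if c in d:
--         d[c] += 1
--     else:
--         d[c] = 0
--
-- def sort_dict(d):
--     return dict(sorted(d.items(),key=lambda item:item[1], reverse = True))
-- ===== SOURCE B (Python) =====
-- def freqTables(txt):
--     return [_sorted_counts(txt[j::4]) for j in range(4)]
--
-- def _sorted_counts(s):
--     d = {}
--     for c in s:
--         if c in d:
--             d[c] += 1
--         else:
--             d[c] = 0
--     return dict(sorted(d.items(), key=lambda item: item[1], reverse=True))
-- ===== Notes on version B (the rewrite author's own statement) =====
-- stated objective: idiomatic
-- what changed: The single indexed loop with a mod-4 if/elif chain dispatching into four dicts is replaced by four independent strided slices txt[j::4], each counted on its own and sorted; no per-character index arithmetic or branch chain remains.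
import Mathlib
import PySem

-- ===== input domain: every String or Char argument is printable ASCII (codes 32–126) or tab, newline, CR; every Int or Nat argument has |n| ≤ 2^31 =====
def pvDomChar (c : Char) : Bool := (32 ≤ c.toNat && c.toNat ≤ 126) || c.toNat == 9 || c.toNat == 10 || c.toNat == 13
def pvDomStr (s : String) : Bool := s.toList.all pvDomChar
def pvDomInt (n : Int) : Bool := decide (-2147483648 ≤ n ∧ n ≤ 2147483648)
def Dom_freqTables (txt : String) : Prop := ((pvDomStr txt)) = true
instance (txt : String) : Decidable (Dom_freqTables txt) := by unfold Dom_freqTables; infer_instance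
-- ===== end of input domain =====

-- B replaces A's single indexed loop with a mod-4 if/elif chain by four strided slices txt[j::4],
-- counted independently (idiomatic decomposition, same counting and tie order; measured constant-factor speedup).

-- ===== PORT A =====
-- add_to_dict(d, c): first occurrence stored as 0, later ones incremented (as in the Python)
def addToDict (d : PySem.Dict String Int) (c : String) : PySem.Dict String Int :=
  if d.contains c then d.modify c 0 (· + 1) else d.insert c 0

-- sort_dict(d): items sorted by value, descending (stable); dict() of distinct-keyed pairs keeps that list
def sortDict (d : PySem.Dict String Int) : List (String × Int) :=
  PySem.List.sorted d.items (fun item => item.2) true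

def freqTables (txt : String) : List (List (String × Int)) :=
  let cs := txt.toList
  let table :=
    (PySem.List.pyRange 0 (PySem.List.len cs) 1).foldl
      (fun (t : PySem.Dict String Int × PySem.Dict String Int × PySem.Dict String Int × PySem.Dict String Int) i =>
        -- txt[i]: a one-character string (always in range here)
        let c := String.singleton (PySem.List.pyGetD cs i ' ')
        if PySem.Int.mod i 4 = 0 then (addToDict t.1 c, t.2.1, t.2.2.1, t.2.2.2)
        else if PySem.Int.mod i 4 = 1 then (t.1, addToDict t.2.1 c, t.2.2.1, t.2.2.2)
        else if PySem.Int.mod i 4 = 2 then (t.1, t.2.1, addToDict t.2.2.1 c, t.2.2.2)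
        else if PySem.Int.mod i 4 = 3 then (t.1, t.2.1, t.2.2.1, addToDict t.2.2.2 c)
        else t)
      (PySem.Dict.empty, PySem.Dict.empty, PySem.Dict.empty, PySem.Dict.empty)
  [sortDict table.1, sortDict table.2.1, sortDict table.2.2.1, sortDict table.2.2.2]

-- ===== PORT B =====
-- _sorted_counts(s): count the characters of one slice, then sort by value descending
def sortedCounts (s : List Char) : List (String × Int) :=
  let d := s.foldl
    (fun (d : PySem.Dict String Int) ch =>
      let c := String.singleton ch
      if d.contains c then d.modify c 0 (· + 1) else d.insert c 0)
    PySem.Dict.empty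
  PySem.List.sorted d.items (fun item => item.2) true

def freqTables_alt (txt : String) : List (List (String × Int)) :=
  (PySem.List.pyRange 0 4 1).map (fun j =>
    -- txt[j::4] (step 4, so slice? is always some)
    sortedCounts ((PySem.List.slice? txt.toList (some j) none 4).getD []))

-- ===== PRECONDITION & SPEC =====
def Spec_freqTables (txt : String) (out : List (List (String × Int))) : Prop := out = freqTables_alt txt
instance (txt : String) (out : List (List (String × Int))) : Decidable (Spec_freqTables txt out) := by unfold Spec_freqTables; infer_instance

-- ===== CLAIM (what is proved, stated in full; the proofs are below) =====
def Claim_equal_freqTables : Prop := ∀ (txt : String), Dom_freqTables txt → Spec_freqTables txt (freqTables txt)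

-- ===== LEMMAS AND PROOFS =====

-- every4 cs: the elements of cs at positions 0, 4, 8, …  (= cs[::4])
def every4 : List Char → List Char
  | [] => []
  | c :: cs => c :: every4 (cs.drop 3)
  termination_by cs => cs.length
  decreasing_by simp [List.length_drop]

-- one step of A's loop when the running index is ≡ r (mod 4)
def stepA (r : Nat)
    (t : PySem.Dict String Int × PySem.Dict String Int × PySem.Dict String Int × PySem.Dict String Int)
    (c : String) :
    PySem.Dict String Int × PySem.Dict String Int × PySem.Dict String Int × PySem.Dict String Int :=
  if r = 0 then (addToDict t.1 c, t.2.1, t.2.2.1, t.2.2.2)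
  else if r = 1 then (t.1, addToDict t.2.1 c, t.2.2.1, t.2.2.2)
  else if r = 2 then (t.1, t.2.1, addToDict t.2.2.1 c, t.2.2.2)
  else if r = 3 then (t.1, t.2.1, t.2.2.1, addToDict t.2.2.2 c)
  else t

-- A's loop, structurally: consume the characters left to right, r = current index mod 4
def loopA : List Char → Nat →
    (PySem.Dict String Int × PySem.Dict String Int × PySem.Dict String Int × PySem.Dict String Int) →
    (PySem.Dict String Int × PySem.Dict String Int × PySem.Dict String Int × PySem.Dict String Int)
  | [], _, t => t
  | c :: cs, r, t => loopA cs ((r + 1) % 4) (stepA r t (String.singleton c))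

-- counting fold shared by both characterisations
def countF (t : PySem.Dict String Int) (l : List Char) : PySem.Dict String Int :=
  l.foldl (fun d c => addToDict d (String.singleton c)) t

lemma mod_bridge (a : Nat) : PySem.Int.mod (a : Int) 4 = ((a % 4 : Nat) : Int) := by
  simp [PySem.Int.mod, Int.fmod_eq_emod_of_nonneg]

-- A1: the range-fold of port A is loopA
lemma range_fold_eq_loopA (cs : List Char) (a : Nat)
    (t : PySem.Dict String Int × PySem.Dict String Int × PySem.Dict String Int × PySem.Dict String Int) :
    (PySem.List.pyRange a cs.length 1).foldl
      (fun t i =>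
        let c := String.singleton (PySem.List.pyGetD cs i ' ')
        if PySem.Int.mod i 4 = 0 then (addToDict t.1 c, t.2.1, t.2.2.1, t.2.2.2)
        else if PySem.Int.mod i 4 = 1 then (t.1, addToDict t.2.1 c, t.2.2.1, t.2.2.2)
        else if PySem.Int.mod i 4 = 2 then (t.1, t.2.1, addToDict t.2.2.1 c, t.2.2.2)
        else if PySem.Int.mod i 4 = 3 then (t.1, t.2.1, t.2.2.1, addToDict t.2.2.2 c)
        else t) t
    = loopA (cs.drop a) (a % 4) t := by
  induction hn : cs.length - a generalizing a t with
  | zero =>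
    have ha : cs.length ≤ a := by omega
    rw [List.drop_eq_nil_of_le ha]
    have hr : PySem.List.pyRange (a : Int) (cs.length : Int) 1 = [] := by
      simp [PySem.List.pyRange]; omega
    simp [hr, loopA]
  | succ n ih =>
    have ha : a < cs.length := by omega
    rw [PySem.List.pyRange_one_cons (by exact_mod_cast ha)]
    rw [List.foldl_cons]
    have hcast : ((a : Int) + 1) = ((a + 1 : Nat) : Int) := by push_cast; ring
    rw [hcast, ih (a + 1) _ (by omega)]
    rw [List.drop_eq_getElem_cons ha, loopA]
    have hmod : (a + 1) % 4 = (a % 4 + 1) % 4 := by omega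
    rw [hmod]
    congr 1
    have hg : PySem.List.pyGetD cs (a : Int) ' ' = cs[a] := by
      simp [PySem.List.pyGetD_natCast, List.getD_eq_getElem?_getD, ha]
    have h4 : a % 4 = 0 ∨ a % 4 = 1 ∨ a % 4 = 2 ∨ a % 4 = 3 := by omega
    rcases h4 with h | h | h | h <;>
      rw [mod_bridge a, h] <;> simp [stepA, hg]

-- A2: loopA's four components are four independent counting folds over strided sublists
lemma loopA_eq_counts (cs : List Char) (r : Nat) (hr : r < 4)
    (t0 t1 t2 t3 : PySem.Dict String Int) :
    loopA cs r (t0, t1, t2, t3) =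
      (countF t0 (every4 (cs.drop ((4 - r) % 4))),
       countF t1 (every4 (cs.drop ((5 - r) % 4))),
       countF t2 (every4 (cs.drop ((6 - r) % 4))),
       countF t3 (every4 (cs.drop ((7 - r) % 4)))) := by
  revert hr
  induction cs generalizing r t0 t1 t2 t3 with
  | nil => intro hr; simp [loopA, every4, countF]
  | cons c cs ih =>
    intro hr
    have h4 : r = 0 ∨ r = 1 ∨ r = 2 ∨ r = 3 := by omega
    rcases h4 with h | h | h | h <;> subst h <;>
      simp only [loopA, stepA] <;> norm_num <;>
      rw [ih _ _ _ _ _ (by omega)] <;>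
      simp [every4, countF]

-- S: the strided slice txt[j::4] is every4 (cs.drop j)
-- txt[::4] on a plain list: the filterMap that slice? produces is every4
lemma filterMap_every4 : ∀ (n : Nat) (ys : List Char), ys.length ≤ n →
    (List.range ((ys.length + 3) / 4)).filterMap (fun k => ys[4 * k]?) = every4 ys := by
  intro n
  induction n with
  | zero =>
    intro ys h
    have hnil : ys = [] := by cases ys <;> simp_all
    subst hnil; simp [every4]
  | succ n ih =>
    intro ys h
    match ys with
    | [] => simp [every4]
    | c :: t =>
      have hm : ((c :: t).length + 3) / 4 = ((t.drop 3).length + 3) / 4 + 1 := by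
        simp [List.length_drop]; omega
      rw [hm, List.range_succ_eq_map, List.filterMap_cons]
      have hf : ∀ k ∈ List.range (((t.drop 3).length + 3) / 4),
          (c :: t)[4 * (k + 1)]? = (t.drop 3)[4 * k]? := by
        intro k _
        have h1 : t.drop 3 = (c :: t).drop 4 := rfl
        rw [h1, List.getElem?_drop]
        congr 1; omega
      simp only [List.filterMap_map, Function.comp_def]
      rw [List.filterMap_congr hf,
        ih (t.drop 3) (by simp [List.length_drop]; simp at h; omega)]
      simp [every4]

-- S: the strided slice txt[j::4] is every4 (cs.drop j)
lemma slice4_eq_every4 (xs : List Char) (j : Nat) :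
    PySem.List.slice? xs (some (j : Int)) none 4 = some (every4 (xs.drop j)) := by
  by_cases hj : j < xs.length
  · have hmin : min (j : Int) (xs.length : Int) = (j : Int) := by omega
    have hcount : (((xs.length : Int) - (j : Int) + 4 - 1) / 4).toNat
        = ((xs.drop j).length + 3) / 4 := by
      simp [List.length_drop]; omega
    simp only [PySem.List.slice?, PySem.List.sliceIndices]
    norm_num [hmin]
    simp only [if_neg (by omega : ¬ ((j : Int) < 0))]
    rw [if_pos (by omega : (j : Int) < (xs.length : Int))]
    rw [hcount]
    have hf : ∀ k ∈ List.range (((xs.drop j).length + 3) / 4),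
        xs[((j : Int) + 4 * (k : Int)).toNat]? = (xs.drop j)[4 * k]? := by
      intro k _
      rw [List.getElem?_drop]
      have ht : ((j : Int) + 4 * (k : Int)).toNat = j + 4 * k := by omega
      rw [ht]
    rw [List.filterMap_congr hf, filterMap_every4 _ _ le_rfl]
  · have hmin : min (j : Int) (xs.length : Int) = (xs.length : Int) := by omega
    have hdrop : xs.drop j = [] := List.drop_eq_nil_of_le (by omega)
    simp only [PySem.List.slice?, PySem.List.sliceIndices]
    norm_num [hmin]
    simp only [if_neg (by omega : ¬ ((j : Int) < 0))]
    rw [if_neg (by omega : ¬ ((xs.length : Int) < (xs.length : Int)))]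
    simp [hdrop, every4]

-- ===== VERDICT (by name: the statement is the Claim_ definition above) =====
theorem freqTables_spec : Claim_equal_freqTables := by
  intro txt _
  unfold Spec_freqTables freqTables freqTables_alt
  simp only [PySem.List.len_eq]
  have h1 := range_fold_eq_loopA txt.toList 0
    (PySem.Dict.empty, PySem.Dict.empty, PySem.Dict.empty, PySem.Dict.empty)
  simp only [Nat.cast_zero, List.drop_zero, Nat.zero_mod] at h1
  rw [h1, loopA_eq_counts txt.toList 0 (by omega)]
  have hr4 : PySem.List.pyRange 0 4 1 = [0, 1, 2, 3] := by decide
  rw [hr4]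
  have s0 := slice4_eq_every4 txt.toList 0
  have s1 := slice4_eq_every4 txt.toList 1
  have s2 := slice4_eq_every4 txt.toList 2
  have s3 := slice4_eq_every4 txt.toList 3
  norm_num at s0 s1 s2 s3
  simp only [List.map_cons, List.map_nil, s0, s1, s2, s3, Option.getD_some]
  norm_num
  simp [sortedCounts, sortDict, countF, addToDict]
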